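-- pv_equiv track=rewrite | github.com/OctopusTentacles/006_Python_Advanced | Module_04/materials/flask_post2.py | search_shift
-- ===== SOURCE A (Python) =====
-- def search_shift(nums):
--     """Двоичный поиск для нахождения сдвига массива.
--
--     Args:
--         nums (int): массив, который был подвергнут циклическому сдвигу.
--     """
--     left, right = 0, len(nums) - 1
--
--     while left < right:
--         # находим средний элемент массива:
--         mid = (left + right) // 2
--
--         # сравниваем средний элемент с первым элементом:
--         if nums[mid] > nums[0]:
--             left = mid + 1
--         else:
--             right = mid
--
--     return left
-- ===== SOURCE B (Python) =====
-- def search_shift(nums):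
--     """Binary search for the rotation shift, as divide-and-conquer on slices."""
--     if not nums:
--         return 0
--     first = nums[0]
--
--     def go(seg, base):
--         # invariant: seg == nums[base:base+len(seg)], len(seg) >= 1
--         if len(seg) <= 1:
--             return base
--         m = (len(seg) - 1) // 2
--         if seg[m] > first:
--             return go(seg[m + 1:], base + m + 1)
--         return go(seg[:m + 1], base)
--
--     return go(nums, 0)
-- ===== Notes on version B (the rewrite author's own statement) =====
-- stated objective: alternative
-- what changed: The iterative two-index while loop is replaced by a recursive divide-and-conquer helper that works on list slices (seg, base), shrinking the physical list each step instead of moving left/right indices over the whole array.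
import Mathlib
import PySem

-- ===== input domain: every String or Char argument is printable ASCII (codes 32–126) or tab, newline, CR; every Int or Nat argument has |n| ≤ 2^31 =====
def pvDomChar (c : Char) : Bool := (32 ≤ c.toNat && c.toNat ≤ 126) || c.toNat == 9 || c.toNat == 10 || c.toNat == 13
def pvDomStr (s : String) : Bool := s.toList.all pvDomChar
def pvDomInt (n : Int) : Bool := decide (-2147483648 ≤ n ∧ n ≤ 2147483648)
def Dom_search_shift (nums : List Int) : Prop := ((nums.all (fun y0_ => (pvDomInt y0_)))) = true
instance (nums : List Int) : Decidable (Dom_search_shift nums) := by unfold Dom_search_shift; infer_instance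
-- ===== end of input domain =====

-- B replaces A's iterative two-index binary search by a recursive divide-and-conquer
-- on list slices (alternative decomposition, same comparisons; no speed claim).

-- ===== PORT A =====
-- termination lemmas for the ports (cited by name in decreasing_by)
theorem searchLoopA_dec1 (left right : Int) (h : left < right) :
    (right - (PySem.Int.floordiv (left + right) 2 + 1)).toNat < (right - left).toNat := by
  simp only [PySem.Int.floordiv_eq_ediv_of_pos (show (0:Int) < 2 by omega)]
  omega

theorem searchLoopA_dec2 (left right : Int) (h : left < right) :
    (PySem.Int.floordiv (left + right) 2 - left).toNat < (right - left).toNat := by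
  simp only [PySem.Int.floordiv_eq_ediv_of_pos (show (0:Int) < 2 by omega)]
  omega

theorem goB_dec1 (seg : List Int) (m : Nat) (h : ¬ seg.length ≤ 1) :
    (PySem.List.slice seg (some ((m : Int) + 1)) none).length < seg.length := by
  rw [show ((m : Int) + 1) = (((m + 1 : Nat)) : Int) by push_cast; ring,
    PySem.List.slice_from_natCast]
  simp only [List.length_drop]
  omega

theorem goB_dec2 (seg : List Int) (h : ¬ seg.length ≤ 1) :
    (PySem.List.slice seg none (some ((((seg.length - 1) / 2 : Nat) : Int) + 1))).length < seg.length := by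
  rw [show ((((seg.length - 1) / 2 : Nat) : Int) + 1) = ((((seg.length - 1) / 2 + 1 : Nat)) : Int) by push_cast; ring,
    PySem.List.slice_to_natCast]
  simp only [List.length_take]
  omega

-- the while loop of A, step for step; indices stay in range, so pyGet? is always some
def searchLoopA (nums : List Int) (left right : Int) : Int :=
  if h : left < right then
    let mid := PySem.Int.floordiv (left + right) 2
    if (PySem.List.pyGet? nums mid).getD 0 > (PySem.List.pyGet? nums 0).getD 0 then
      searchLoopA nums (mid + 1) right
    else
      searchLoopA nums left mid
  else
    left
termination_by (right - left).toNat
decreasing_by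
  · exact searchLoopA_dec1 left right h
  · exact searchLoopA_dec2 left right h

def search_shift (nums : List Int) : Int :=
  searchLoopA nums 0 ((nums.length : Int) - 1)

-- ===== PORT B =====
-- recursive helper go(seg, base) of Source B; seg[m+1:] / seg[:m+1] via PySem.List.slice
def goB (first : Int) (seg : List Int) (base : Int) : Int :=
  if seg.length ≤ 1 then base
  else
    let m : Nat := (seg.length - 1) / 2
    if (PySem.List.pyGet? seg (m : Int)).getD 0 > first then
      goB first (PySem.List.slice seg (some ((m : Int) + 1)) none) (base + (m : Int) + 1)
    else
      goB first (PySem.List.slice seg none (some ((m : Int) + 1))) base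
termination_by seg.length
decreasing_by
  · exact goB_dec1 seg m (by omega)
  · exact goB_dec2 seg (by omega)

def search_shift_alt (nums : List Int) : Int :=
  if nums.length = 0 then 0
  else goB ((PySem.List.pyGet? nums 0).getD 0) nums 0

-- ===== PRECONDITION & SPEC =====
def Spec_search_shift (nums : List Int) (out : Int) : Prop := out = search_shift_alt nums
instance (nums : List Int) (out : Int) : Decidable (Spec_search_shift nums out) := by unfold Spec_search_shift; infer_instance

-- ===== CLAIM (what is proved, stated in full; the proofs are below) =====
def Claim_equal_search_shift : Prop := ∀ (nums : List Int), Dom_search_shift nums → Spec_search_shift nums (search_shift nums)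

-- ===== LEMMAS AND PROOFS =====

-- the loop of A on [left,right] equals go of B on the physical slice nums[left:right+1]
theorem loop_eq_goB (nums : List Int) (fuel : Nat) :
    ∀ (left right : Int), (right - left).toNat = fuel → 0 ≤ left → left ≤ right →
      right < (nums.length : Int) →
      searchLoopA nums left right =
        goB ((PySem.List.pyGet? nums 0).getD 0)
          ((nums.drop left.toNat).take ((right - left).toNat + 1)) left := by
  induction fuel using Nat.strong_induction_on with
  | _ fuel ih =>
    intro left right hfuel h0 hlr hlen
    by_cases h : left < right
    · -- loop body runs
      have hmid : PySem.Int.floordiv (left + right) 2 = (left + right) / 2 :=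
        PySem.Int.floordiv_eq_ediv_of_pos (by omega)
      set k : Nat := (right - left).toNat with hk
      have hk' : (k : Int) = right - left := by omega
      set m : Nat := k / 2 with hm
      have hmidval : (left + right) / 2 = left + (m : Int) := by omega
      have hmlt : m < k := by omega
      set seg : List Int := (nums.drop left.toNat).take (k + 1) with hseg
      have hseglen : seg.length = k + 1 := by
        simp only [hseg, List.length_take, List.length_drop]
        omega
      have hcast : ((m : Int) + 1) = (((m + 1 : Nat) : Int)) := by push_cast; ring
      -- the two compared elements coincide: both are nums[left.toNat + m]
      have hidx : (left + (m : Int)) = (((left.toNat + m : Nat)) : Int) := by omega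
      have hgetA : PySem.List.pyGet? nums (left + (m : Int)) = nums[left.toNat + m]? := by
        rw [hidx, PySem.List.pyGet?_natCast]
      have hgetB : PySem.List.pyGet? seg (m : Int) = nums[left.toNat + m]? := by
        rw [PySem.List.pyGet?_natCast, hseg, List.getElem?_take]
        simp only [hmlt, Nat.lt_succ_of_lt, if_true, List.getElem?_drop]
      -- one unfolding of goB on this segment
      have hgoB : goB ((PySem.List.pyGet? nums 0).getD 0) seg left
          = if nums[left.toNat + m]?.getD 0 > (PySem.List.pyGet? nums 0).getD 0 then
              goB ((PySem.List.pyGet? nums 0).getD 0) (seg.drop (m + 1)) (left + (m : Int) + 1)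
            else
              goB ((PySem.List.pyGet? nums 0).getD 0) (seg.take (m + 1)) left := by
        rw [goB, if_neg (by omega)]
        simp only [hseglen, Nat.add_sub_cancel, ← hm, hgetB, hcast,
          PySem.List.slice_from_natCast, PySem.List.slice_to_natCast]
      rw [searchLoopA, dif_pos h, hgoB]
      simp only [hmid, hmidval, hgetA]
      split_ifs with hcmp
      · -- left := mid + 1
        have hrec := ih (k - m - 1) (by omega) (left + (m : Int) + 1) right
          (by omega) (by omega) (by omega) hlen
        rw [hrec]
        have hsegarg : seg.drop (m + 1)
            = (nums.drop ((left + (m : Int) + 1).toNat)).take ((right - (left + (m : Int) + 1)).toNat + 1) := by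
          rw [hseg, List.drop_take, List.drop_drop]
          congr 1
          · omega
          · congr 1
            omega
        rw [hsegarg]
      · -- right := mid
        have hrec := ih m (by omega) left (left + (m : Int))
          (by omega) h0 (by omega) (by omega)
        rw [hrec]
        have hsegarg : seg.take (m + 1)
            = (nums.drop left.toNat).take ((left + (m : Int) - left).toNat + 1) := by
          rw [hseg, List.take_take]
          congr 1
          omega
        rw [hsegarg]
    · -- loop exits: left = right, segment has one element
      rw [searchLoopA, dif_neg h, goB, if_pos]
      have hk0 : (right - left).toNat = 0 := by omega
      rw [hk0]
      calc ((nums.drop left.toNat).take (0 + 1)).length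
          ≤ 0 + 1 := by rw [List.length_take]; exact min_le_left _ _
        _ = 1 := rfl

-- ===== VERDICT (by name: the statement is the Claim_ definition above) =====
theorem search_shift_spec : Claim_equal_search_shift := by
  intro nums _
  unfold Spec_search_shift search_shift search_shift_alt
  rcases Nat.eq_zero_or_pos nums.length with h | h
  · rw [searchLoopA]
    simp [h]
  · rw [if_neg (by omega)]
    have hmain := loop_eq_goB nums ((nums.length : Int) - 1 - 0).toNat 0 ((nums.length : Int) - 1)
      rfl le_rfl (by omega) (by omega)
    have h1 : ((nums.length : Int) - 1 - 0).toNat + 1 = nums.length := by omega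
    rw [hmain, show (Int.toNat 0) = 0 from rfl, List.drop_zero, h1, List.take_length]
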